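-- pv_equiv track=rewrite | github.com/Austinn243/advent_of_code_2022 | day5/main.py | parse_initial_stacks
-- ===== SOURCE A (Python) =====
-- SupplyStack = list[str]
--
-- def parse_initial_stacks(lines: list[str]) -> list[SupplyStack]:
--     """Parse the initial supply stacks from a list of lines."""
--
--     stack_numbers_line = lines.pop().strip()
--     stack_count = int(stack_numbers_line[-1])
--
--     line_length = len(lines[0])
--     stacks = [[] for _ in range(stack_count)]
--     for line in reversed(lines):
--         for i in range(1, line_length, 4):
--             crate = line[i]
--             if crate == " ":
--                 continue
--
--             stack_number = (i - 1) // 4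
--             stacks[stack_number].append(crate)
--
--     return stacks
-- ===== SOURCE B (Python) =====
-- SupplyStack = list[str]
--
-- def parse_initial_stacks(lines: list[str]) -> list[SupplyStack]:
--     """Parse the initial supply stacks as a staged pipeline:
--     slice each line into its crate row, pad/truncate to the stack count,
--     transpose the resulting grid with zip, then reverse-and-filter each column."""
--
--     stack_numbers_line = lines.pop().strip()
--     stack_count = int(stack_numbers_line[-1])
--
--     line_length = len(lines[0])
--     grid = [(line[1:line_length:4] + " " * stack_count)[:stack_count] for line in lines]
--     return [[crate for crate in column[::-1] if crate != " "] for column in zip(*grid)]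
-- ===== Notes on version B (the rewrite author's own statement) =====
-- stated objective: alternative
-- what changed: A fills pre-built stacks with per-crate appends in a nested loop over reversed lines and column indices; B is a staged pipeline with no index arithmetic per crate: slice each line into its crate row, pad/truncate it to the stack count, transpose the grid with zip(*grid), then reverse-and-filter each column.
import Mathlib
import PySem

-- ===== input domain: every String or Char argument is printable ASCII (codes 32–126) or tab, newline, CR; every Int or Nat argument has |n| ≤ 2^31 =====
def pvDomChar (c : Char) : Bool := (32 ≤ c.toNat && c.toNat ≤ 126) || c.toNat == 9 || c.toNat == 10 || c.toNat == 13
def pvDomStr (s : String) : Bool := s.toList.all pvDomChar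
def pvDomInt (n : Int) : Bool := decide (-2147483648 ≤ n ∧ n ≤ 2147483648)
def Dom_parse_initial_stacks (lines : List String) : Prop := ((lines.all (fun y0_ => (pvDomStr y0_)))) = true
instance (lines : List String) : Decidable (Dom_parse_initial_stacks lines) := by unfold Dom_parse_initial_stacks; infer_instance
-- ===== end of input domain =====

-- B replaces A's nested per-crate append loop by a staged pipeline: slice each line into its
-- crate row, pad/truncate it to the stack count, transpose the grid with zip, then
-- reverse-and-filter each column ('alternative' objective, same cost).  Both A and B pop the
-- last element off `lines` in Python; the theorems here are about the return value.

-- ===== PORT A =====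
def parse_initial_stacks (lines : List String) : List (List String) :=
  match lines.getLast? with
  | none => []                    -- lines.pop() raises IndexError (outside Pre_)
  | some popped =>
    let rest := lines.dropLast    -- state of `lines` after the pop
    let stack_numbers_line := PySem.Str.strip popped
    match PySem.Str.pyGet? stack_numbers_line (-1) with
    | none => []                  -- IndexError (outside Pre_)
    | some c =>
      match PySem.Int.ofStr? (String.ofList [c]) with
      | none => []                -- ValueError (outside Pre_)
      | some stack_count =>
        match rest.head? with
        | none => []              -- lines[0] raises IndexError (outside Pre_)
        | some first =>
          let line_length : Int := PySem.Str.len first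
          let stks : List (List String) :=
            (PySem.List.pyRange 0 stack_count 1).map (fun _ => [])
          rest.reverse.foldl
            (fun stks line =>
              (PySem.List.pyRange 1 line_length 4).foldl
                (fun stks i =>
                  let crate := PySem.List.pyGetD line.toList i ' '
                  if crate = ' ' then stks
                  else
                    let stack_number := PySem.Int.floordiv (i - 1) 4
                    PySem.List.pySetD stks stack_number
                      (PySem.List.pyGetD stks stack_number [] ++ [String.ofList [crate]]))
                stks)
            stks

-- ===== PORT B =====
-- zip(*grid): one tuple per position while every row still has a character (Python's zip
-- stops at the shortest iterable); structural recursion on the first row.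
def pyZipAux : List Char → List (List Char) → List (List Char)
  | [], _ => []
  | c :: r, rs =>
    if rs.any (fun t => t.isEmpty) then []
    else (c :: rs.map (fun t => t.headD ' ')) :: pyZipAux r (rs.map (fun t => t.tail))

def pyZip (rows : List (List Char)) : List (List Char) :=
  match rows with
  | [] => []                      -- zip() of no iterables is empty
  | r :: rs => pyZipAux r rs

def parse_initial_stacks_alt (lines : List String) : List (List String) :=
  match lines.getLast? with
  | none => []                    -- lines.pop() raises IndexError (outside Pre_)
  | some popped =>
    let rest := lines.dropLast
    let stack_numbers_line := PySem.Str.strip popped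
    match PySem.Str.pyGet? stack_numbers_line (-1) with
    | none => []
    | some c =>
      match PySem.Int.ofStr? (String.ofList [c]) with
      | none => []
      | some stack_count =>
        match rest.head? with
        | none => []              -- lines[0] raises IndexError (outside Pre_)
        | some first =>
          let line_length : Int := PySem.Str.len first
          -- grid row: (line[1:line_length:4] + " " * stack_count)[:stack_count]
          -- (step-4 slice never raises: slice? is some since the step is nonzero;
          --  " " * stack_count is empty for stack_count ≤ 0, hence .toNat)
          let grid : List (List Char) := rest.map (fun line =>
            PySem.List.slice
              (((PySem.List.slice? line.toList (some 1) (some line_length) 4).getD [])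
                ++ List.replicate stack_count.toNat ' ')
              none (some stack_count))
          -- [[crate for crate in column[::-1] if crate != " "] for column in zip(*grid)]
          -- (iterating a Python str yields 1-character strings; column[::-1] is reverse)
          (pyZip grid).map (fun col =>
            (col.reverse.filter (fun ch => ch ≠ ' ')).map (fun ch => String.ofList [ch]))

-- ===== PRECONDITION & SPEC =====
-- Pre_ is exactly the inputs on which A returns without an exception: at least two lines, the
-- stripped last line ends in a digit n, and every scanned cell row[c], c in range(1, len(lines[0]), 4),
-- exists (else IndexError) and is blank whenever its stack (c-1)//4 is ≥ n (else stacks[...] raises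
-- IndexError).  The conjunct 0 ≤ n is automatic (n is parsed from a single digit) and excludes nothing.
def preCheck (lines : List String) : Bool :=
  match lines.getLast? with
  | none => false
  | some popped =>
    let rest := lines.dropLast
    match PySem.Str.pyGet? (PySem.Str.strip popped) (-1) with
    | none => false
    | some c =>
      match PySem.Int.ofStr? (String.ofList [c]) with
      | none => false
      | some n =>
        match rest.head? with
        | none => false
        | some first =>
          let L : Int := PySem.Str.len first
          decide (0 ≤ n) &&
          rest.all (fun row =>
            (PySem.List.pyRange 1 L 4).all (fun i =>
              decide (i < PySem.Str.len row) &&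
              (PySem.List.pyGetD row.toList i ' ' == ' ' ||
                decide (PySem.Int.floordiv (i - 1) 4 < n))))

def Pre_parse_initial_stacks (lines : List String) : Prop := preCheck lines = true
instance (lines : List String) : Decidable (Pre_parse_initial_stacks lines) := by
  unfold Pre_parse_initial_stacks; infer_instance

def pvWitness_parse_initial_stacks : List String := ["[A] [B]", " 1   2"]

def Spec_parse_initial_stacks (lines : List String) (out : List (List String)) : Prop := out = parse_initial_stacks_alt lines
instance (lines : List String) (out : List (List String)) : Decidable (Spec_parse_initial_stacks lines out) := by unfold Spec_parse_initial_stacks; infer_instance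

-- ===== CLAIM (what is proved, stated in full; the proofs are below) =====
def Claim_equal_parse_initial_stacks : Prop := ∀ (lines : List String), Dom_parse_initial_stacks lines → Pre_parse_initial_stacks lines → Spec_parse_initial_stacks lines (parse_initial_stacks lines)

-- ===== LEMMAS AND PROOFS =====

-- the crate character of stack k in a row (' ' also when the row is too short)
def colChar (row : String) (k : Nat) : Char := row.toList.getD (1 + 4*k) ' '
-- the crate stack k receives from a row (L = length of line 0)
def pick (L : Nat) (k : Nat) (row : String) : Option String :=
  if 1 + 4*k < L ∧ colChar row k ≠ ' ' then some (String.ofList [colChar row k]) else none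
def push (L : Nat) (row : String) (k : Nat) (s : List String) : List String :=
  s ++ (pick L k row).toList
-- a row A accepts: a non-blank scanned cell (column below L) belongs to a stack < m
def RowPre (L m : Nat) (row : String) : Prop :=
  ∀ k : Nat, 1 + 4*k < L → colChar row k ≠ ' ' → k < m
-- the Int column index of stack k
def colIdx (k : Nat) : Int := 1 + 4*(k:Int)
-- the character B's grid stores for stack k of a row
def charAt (L : Nat) (k : Nat) (row : String) : Char :=
  if 1 + 4*k < L then colChar row k else ' '

-- an index loop that conditionally writes slot k at step k, skipping everything else
theorem foldl_set_skip {α : Type} (d : α) (cond : Nat → Bool) (f : Nat → α → α) :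
    ∀ (K : Nat) (st : List α), (∀ k, k < K → cond k = true → k < st.length) →
    (List.range K).foldl (fun st k => if cond k then st.set k (f k (st.getD k d)) else st) st
      = st.mapIdx (fun k s => if k < K ∧ cond k = true then f k s else s) := by
  intro K
  induction K with
  | zero =>
    intro st _
    apply List.ext_getElem
    · simp
    · intro j hj hj'
      simp [List.getElem_mapIdx]
  | succ p ih =>
    intro st hsafe
    rw [List.range_succ, List.foldl_append,
        ih st (fun k hk hc => hsafe k (by omega) hc)]
    simp only [List.foldl_cons, List.foldl_nil]
    cases hcp : cond p with
    | false =>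
      rw [if_neg (by simp)]
      apply List.ext_getElem
      · simp
      · intro j hj hj'
        rw [List.getElem_mapIdx, List.getElem_mapIdx]
        by_cases hjp : j = p
        · subst hjp; simp [hcp]
        · by_cases h2 : j < p
          · simp [show j < p + 1 by omega, h2]
          · simp [show ¬ (j < p + 1) by omega, h2]
    | true =>
      rw [if_pos (by simp)]
      have hpm : p < st.length := hsafe p (by omega) hcp
      have hp' : p < (st.mapIdx (fun k s => if k < p ∧ cond k = true then f k s else s)).length := by
        simp [hpm]
      have hgd : (st.mapIdx (fun k s => if k < p ∧ cond k = true then f k s else s)).getD p d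
          = st[p] := by
        rw [List.getD_eq_getElem _ _ hp', List.getElem_mapIdx]
        simp
      rw [hgd]
      apply List.ext_getElem
      · simp
      · intro j hj hj'
        rw [List.getElem_set, List.getElem_mapIdx, List.getElem_mapIdx]
        by_cases hjp : j = p
        · subst hjp; simp [hcp]
        · have hpj : p ≠ j := fun h => hjp h.symm
          by_cases h2 : j < p
          · simp [hpj, h2, show j < p + 1 by omega]
          · simp [hpj, h2, show ¬ (j < p + 1) by omega]

-- A's inner step on column 1+4k is the conditional-write step on slot k
theorem step_eq (line : String) (st : List (List String)) (k : Nat) :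
    (let crate := PySem.List.pyGetD line.toList (colIdx k) ' ';
     if crate = ' ' then st
     else
       let stack_number := PySem.Int.floordiv (colIdx k - 1) 4
       PySem.List.pySetD st stack_number
         (PySem.List.pyGetD st stack_number [] ++ [String.ofList [crate]]))
    = (if !(colChar line k == ' ')
       then st.set k ((fun k s => s ++ [String.ofList [colChar line k]]) k (st.getD k []))
       else st) := by
  have h1 : colIdx k = ((1+4*k : Nat):Int) := by unfold colIdx; push_cast; ring
  have h2 : PySem.Int.floordiv (((1+4*k : Nat):Int) - 1) 4 = ((k:Nat):Int) := by
    rw [PySem.Int.floordiv_eq_ediv_of_pos (by norm_num)]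
    omega
  simp only [h1, h2, PySem.List.pyGetD_natCast, PySem.List.pySetD_natCast]
  unfold colChar
  simp only [List.getD_eq_getElem?_getD]
  by_cases hsp : line.toList[1+4*k]?.getD ' ' = ' '
  · rw [if_pos hsp, if_neg (by simp [hsp])]
  · rw [if_neg hsp, if_pos (by simp [hsp])]

-- one row of A's loop acts on the m stacks as mapIdx push
theorem row_mapIdx (L m K : Nat) (row : String) (st : List (List String))
    (hst : st.length = m) (hK : ∀ k : Nat, k < K ↔ 1 + 4*k < L)
    (hrow : RowPre L m row) :
    ((List.range K).map colIdx).foldl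
      (fun stks i =>
        let crate := PySem.List.pyGetD row.toList i ' '
        if crate = ' ' then stks
        else
          let stack_number := PySem.Int.floordiv (i - 1) 4
          PySem.List.pySetD stks stack_number
            (PySem.List.pyGetD stks stack_number [] ++ [String.ofList [crate]]))
      st
    = st.mapIdx (fun k s => push L row k s) := by
  rw [List.foldl_map]
  have hfun : (fun (stks : List (List String)) (k : Nat) =>
      let crate := PySem.List.pyGetD row.toList (colIdx k) ' '
      if crate = ' ' then stks
      else
        let stack_number := PySem.Int.floordiv (colIdx k - 1) 4
        PySem.List.pySetD stks stack_number
          (PySem.List.pyGetD stks stack_number [] ++ [String.ofList [crate]]))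
    = (fun (stks : List (List String)) (k : Nat) =>
        if !(colChar row k == ' ')
        then stks.set k ((fun k s => s ++ [String.ofList [colChar row k]]) k (stks.getD k []))
        else stks) := by
    funext stks k
    exact step_eq row stks k
  rw [hfun,
      foldl_set_skip [] (fun k => !(colChar row k == ' '))
        (fun k s => s ++ [String.ofList [colChar row k]]) K st ?hsafe]
  case hsafe =>
    intro k hkK hc
    have hcs : colChar row k ≠ ' ' := by simpa using hc
    have := hrow k ((hK k).mp hkK) hcs
    omega
  apply List.ext_getElem
  · simp
  · intro j hj hj'
    rw [List.getElem_mapIdx, List.getElem_mapIdx]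
    have hjm : j < m := by
      have hjj := hj
      simp only [List.length_mapIdx] at hjj
      omega
    unfold push pick
    by_cases hsp : colChar row j = ' '
    · simp [hsp]
    · by_cases hjK : j < K
      · rw [if_pos ⟨hjK, by simp [hsp]⟩, if_pos ⟨(hK j).mp hjK, hsp⟩]
        simp
      · rw [if_neg (by tauto), if_neg (by rw [← hK j]; tauto)]
        simp

-- the outer loop over the rows, column-wise characterisation
theorem outer_char (L m K : Nat) (hK : ∀ k : Nat, k < K ↔ 1 + 4*k < L) :
    ∀ (rows : List String) (g : Nat → List String), (∀ row ∈ rows, RowPre L m row) →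
    rows.foldl
      (fun stks row =>
        ((List.range K).map colIdx).foldl
          (fun stks i =>
            let crate := PySem.List.pyGetD row.toList i ' '
            if crate = ' ' then stks
            else
              let stack_number := PySem.Int.floordiv (i - 1) 4
              PySem.List.pySetD stks stack_number
                (PySem.List.pyGetD stks stack_number [] ++ [String.ofList [crate]]))
          stks)
      ((List.range m).map g)
    = (List.range m).map (fun k => g k ++ rows.filterMap (pick L k)) := by
  intro rows
  induction rows with
  | nil => intro g _; simp
  | cons row rows ih =>
    intro g hrows
    simp only [List.foldl_cons]
    rw [row_mapIdx L m K row _ (by simp) hK (hrows row List.mem_cons_self)]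
    have hmap : (List.map g (List.range m)).mapIdx (fun k s => push L row k s)
        = (List.range m).map (fun k => push L row k (g k)) := by
      apply List.ext_getElem
      · simp
      · intro j hj hj'
        rw [List.getElem_mapIdx]
        simp
    rw [hmap, ih _ (fun r hr => hrows r (List.mem_cons_of_mem _ hr))]
    apply List.map_congr_left
    intro k _
    simp only [push, List.filterMap_cons]
    cases pick L k row <;> simp

-- the Bool check of Pre_ for one row gives RowPre
theorem rowPre_of_checks (Lnat m : Nat) (row : String)
    (h1 : ∀ i ∈ PySem.List.pyRange 1 (Lnat:Int) 4,
      PySem.List.pyGetD row.toList i ' ' = ' ' ∨ PySem.Int.floordiv (i - 1) 4 < (m:Int)) :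
    RowPre Lnat m row := by
  intro k hkL hk
  have hmem : ((1+4*k : Nat):Int) ∈ PySem.List.pyRange 1 (Lnat:Int) 4 := by
    rw [PySem.List.mem_pyRange_iff_of_pos (by norm_num)]
    refine ⟨by push_cast; omega, by push_cast; omega, ⟨(k:Int), by push_cast; ring⟩⟩
  have := h1 _ hmem
  rw [PySem.List.pyGetD_natCast] at this
  cases this with
  | inl h => exact absurd h hk
  | inr h =>
    rw [PySem.Int.floordiv_eq_ediv_of_pos (by norm_num)] at h
    omega

-- the Bool check of Pre_ for one row gives validity of every scanned index
theorem valid_of_checks (Lnat K : Nat) (row : String)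
    (hK : ∀ k : Nat, k < K ↔ 1 + 4*k < Lnat)
    (h1 : ∀ i ∈ PySem.List.pyRange 1 (Lnat:Int) 4, i < PySem.Str.len row) :
    ∀ k : Nat, k < K → 1 + 4*k < row.toList.length := by
  intro k hk
  have hmem : ((1+4*k : Nat):Int) ∈ PySem.List.pyRange 1 (Lnat:Int) 4 := by
    rw [PySem.List.mem_pyRange_iff_of_pos (by norm_num)]
    have := (hK k).mp hk
    refine ⟨by push_cast; omega, by push_cast; omega, ⟨(k:Int), by push_cast; ring⟩⟩
  have := h1 _ hmem
  rw [PySem.Str.len_eq row] at this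
  exact_mod_cast this

-- the step-4 slice, characterised when every scanned index exists
theorem slice4_char (xs : List Char) (L K : Nat)
    (hK : ∀ k : Nat, k < K ↔ 1 + 4*k < L)
    (hvalid : ∀ k : Nat, k < K → 1 + 4*k < xs.length) :
    PySem.List.slice? xs (some 1) (some (L:Int)) 4
      = some ((List.range K).map (fun k => xs.getD (1+4*k) ' ')) := by
  unfold PySem.List.slice? PySem.List.sliceIndices
  rw [if_neg (by norm_num)]
  simp only [show ¬ ((4:Int) < 0) by norm_num, if_false, if_pos (show (0:Int) < 4 by norm_num)]
  rw [if_neg (show ¬ ((1:Int) < 0) by norm_num), if_neg (show ¬ ((L:Int) < 0) by omega)]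
  rcases Nat.eq_zero_or_pos K with hK0 | hKpos
  · subst hK0
    have hL1 : L ≤ 1 := by have := (hK 0); omega
    rw [if_neg (by omega)]
    simp
  · -- K ≥ 1: the first scanned index exists, so xs has ≥ 2 chars and start = 1
    have h0 : 1 + 4*0 < xs.length := hvalid 0 hKpos
    have hlen2 : 2 ≤ xs.length := by omega
    have hlast : 1 + 4*(K-1) < xs.length := hvalid (K-1) (by omega)
    have hLlo : 1 + 4*(K-1) < L := (hK (K-1)).mp (by omega)
    have hLhi : ¬ (1 + 4*K < L) := by rw [← hK K]; omega
    have hs : min (1:Int) (xs.length:Int) = 1 := by omega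
    rw [hs]
    set e : Int := min (L:Int) (xs.length:Int) with he
    have he1 : (1:Int) < e := by omega
    rw [if_pos he1]
    have hcount : ((e - 1 + 4 - 1) / 4).toNat = K := by omega
    rw [hcount]
    congr 1
    have hmap : ∀ k ∈ List.range K,
        xs[((1:Int) + 4 * (k:Int)).toNat]? = some (xs.getD (1+4*k) ' ') := by
      intro k hkm
      rw [List.mem_range] at hkm
      have hv := hvalid k hkm
      have ht : ((1:Int) + 4 * (k:Int)).toNat = 1 + 4*k := by omega
      rw [ht, List.getElem?_eq_getElem hv, List.getD_eq_getElem _ _ hv]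
    rw [List.filterMap_congr hmap]
    simp

-- B's padded, truncated grid row, characterised
theorem grid_row (row : String) (L K m : Nat)
    (hK : ∀ k : Nat, k < K ↔ 1 + 4*k < L)
    (hvalid : ∀ k : Nat, k < K → 1 + 4*k < row.toList.length) :
    PySem.List.slice
        (((PySem.List.slice? row.toList (some 1) (some (L:Int)) 4).getD [])
          ++ List.replicate ((m:Int)).toNat ' ')
        none (some ((m:Int)))
      = (List.range m).map (fun k => charAt L k row) := by
  rw [slice4_char row.toList L K hK hvalid]
  simp only [Option.getD_some, Int.toNat_natCast, PySem.List.slice_to_natCast]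
  apply List.ext_getElem
  · simp
  · intro j hj hj'
    rw [List.getElem_take, List.getElem_map, List.getElem_range]
    have hjm : j < m := by simpa using hj'
    by_cases hjK : j < K
    · rw [List.getElem_append_left (by simpa using hjK), List.getElem_map, List.getElem_range]
      unfold charAt colChar
      rw [if_pos ((hK j).mp hjK)]
    · rw [List.getElem_append_right (by simpa using hjK)]
      simp only [List.getElem_replicate]
      unfold charAt
      rw [if_neg (by rw [← hK j]; exact hjK)]

-- t.getD (k+1) d reads the tail
theorem getD_succ_tail {α : Type} (t : List α) (k : Nat) (d : α) :
    t.getD (k+1) d = t.tail.getD k d := by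
  cases t <;> simp

-- zip(*rows) on a rectangular grid is the list of its columns
theorem pyZipAux_cols : ∀ (m : Nat) (r : List Char) (rs : List (List Char)),
    r.length = m → (∀ t ∈ rs, t.length = m) →
    pyZipAux r rs = (List.range m).map (fun k => (r :: rs).map (fun t => t.getD k ' ')) := by
  intro m
  induction m with
  | zero =>
    intro r rs hr _
    rw [List.eq_nil_of_length_eq_zero hr]
    simp [pyZipAux]
  | succ p ih =>
    intro r rs hr hrs
    obtain ⟨c, r', rfl⟩ : ∃ c r', r = c :: r' := by
      cases r with
      | nil => simp at hr
      | cons c r' => exact ⟨c, r', rfl⟩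
    have hne : rs.any (fun t => t.isEmpty) = false := by
      rw [List.any_eq_false]
      intro t ht
      have h := hrs t ht
      cases t with
      | nil => simp at h
      | cons a u => simp
    unfold pyZipAux
    rw [hne]
    simp only [Bool.false_eq_true, if_false]
    rw [ih r' (rs.map (fun t => t.tail)) (by simpa using hr) ?htails]
    case htails =>
      intro t ht
      rw [List.mem_map] at ht
      obtain ⟨u, hu, rfl⟩ := ht
      have h := hrs u hu
      cases u with
      | nil => simp at h
      | cons a v => simpa using h
    rw [List.range_succ_eq_map, List.map_cons]
    congr 1
    · simp only [List.map_cons, List.getD_cons_zero]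
      congr 1
      apply List.map_congr_left
      intro t _
      cases t <;> simp
    · rw [List.map_map]
      apply List.map_congr_left
      intro k _
      simp only [Function.comp_apply, List.map_cons, List.getD_cons_succ, List.map_map]
      congr 1
      apply List.map_congr_left
      intro t _
      exact (getD_succ_tail t k ' ').symm

-- a column of B, filtered and wrapped, is A's filterMap of pick
theorem column_filter (L k : Nat) :
    ∀ (rows : List String),
    ((rows.map (fun row => charAt L k row)).filter (fun ch => ch ≠ ' ')).map
        (fun ch => String.ofList [ch])
      = rows.filterMap (pick L k) := by
  intro rows
  induction rows with
  | nil => simp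
  | cons row rows ih =>
    simp only [List.map_cons, List.filterMap_cons]
    have hpick : pick L k row
        = if charAt L k row ≠ ' ' then some (String.ofList [charAt L k row]) else none := by
      unfold pick charAt
      by_cases hL : 1 + 4*k < L
      · rw [if_pos hL]
        by_cases hsp : colChar row k = ' '
        · rw [if_neg (by tauto), if_neg (by simpa using hsp)]
        · rw [if_pos ⟨hL, hsp⟩, if_pos (by simpa using hsp)]
      · rw [if_neg hL, if_neg (by tauto), if_neg (by simp)]
    rw [hpick]
    by_cases hsp : charAt L k row = ' '
    · rw [List.filter_cons_of_neg (by simpa using hsp), if_neg (by simpa using hsp), ih]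
    · rw [List.filter_cons_of_pos (by simpa using hsp), if_pos (by simpa using hsp),
          List.map_cons, ih]

-- ===== VERDICT (by name: the statement is the Claim_ definition above) =====
theorem parse_initial_stacks_spec : Claim_equal_parse_initial_stacks := by
  intro lines _ hpre
  unfold Spec_parse_initial_stacks parse_initial_stacks parse_initial_stacks_alt
  unfold Pre_parse_initial_stacks preCheck at hpre
  cases hlast : lines.getLast? with
  | none => exfalso; rw [hlast] at hpre; simp at hpre
  | some popped =>
  rw [hlast] at hpre
  simp only [] at hpre
  cases hc : PySem.Str.pyGet? (PySem.Str.strip popped) (-1) with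
  | none => exfalso; rw [hc] at hpre; simp at hpre
  | some c =>
  rw [hc] at hpre
  simp only [] at hpre
  cases hn : PySem.Int.ofStr? (String.ofList [c]) with
  | none => exfalso; rw [hn] at hpre; simp at hpre
  | some n =>
  rw [hn] at hpre
  simp only [] at hpre
  cases hh : lines.dropLast.head? with
  | none => exfalso; rw [hh] at hpre; simp at hpre
  | some first =>
  rw [hh] at hpre
  simp only [] at hpre
  simp only []
  rw [hc]
  simp only []
  rw [hn]
  simp only []
  rw [hh]
  simp only []
  simp only [Bool.and_eq_true, List.all_eq_true, Bool.or_eq_true, beq_iff_eq,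
    decide_eq_true_eq] at hpre
  obtain ⟨hn0, hall⟩ := hpre
  have hLfirst : PySem.Str.len first = (first.toList.length : Int) := PySem.Str.len_eq first
  obtain ⟨m, rfl⟩ : ∃ m : Nat, n = (m:Int) := ⟨n.toNat, by omega⟩
  have hrows : ∀ row ∈ lines.dropLast, RowPre first.toList.length m row := by
    intro row hmem
    apply rowPre_of_checks
    intro i hi
    rw [← hLfirst] at hi
    exact (hall row hmem i hi).2
  -- the scanned columns are colIdx k for k < K
  have hcols : ∃ K : Nat, (∀ k : Nat, k < K ↔ 1 + 4*k < first.toList.length) ∧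
      PySem.List.pyRange 1 (first.toList.length:Int) 4 = (List.range K).map colIdx := by
    refine ⟨(if 1 < first.toList.length then (first.toList.length + 2)/4 else 0), ?_, ?_⟩
    · intro k
      split_ifs with h <;> omega
    · rw [PySem.List.pyRange_of_pos 1 _ (by norm_num)]
      have hcnt : (if (1:Int) < (first.toList.length:Int)
          then (((first.toList.length:Int) - 1 + 4 - 1)/4).toNat else 0)
          = (if 1 < first.toList.length then (first.toList.length + 2)/4 else 0) := by
        split_ifs with h h' <;> omega
      rw [hcnt]
      apply List.map_congr_left
      intro k _
      simp [colIdx]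
  obtain ⟨K, hK, hKcols⟩ := hcols
  have hvalid : ∀ row ∈ lines.dropLast, ∀ k : Nat, k < K → 1 + 4*k < row.toList.length := by
    intro row hmem
    apply valid_of_checks first.toList.length K row hK
    intro i hi
    rw [← hLfirst] at hi
    exact (hall row hmem i hi).1
  have hinit : ((PySem.List.pyRange 0 (m:Int) 1).map (fun _ => ([]:List String)))
      = (List.range m).map (fun _ => ([]:List String)) := by
    rw [PySem.List.pyRange_zero, List.map_map]
    rfl
  -- A's side
  rw [hLfirst, hKcols, hinit,
      outer_char first.toList.length m K hK lines.dropLast.reverse (fun _ => [])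
        (fun r hr => hrows r (List.mem_reverse.mp hr))]
  -- B's side: the grid rows are the charAt columns of each line
  have hgrid : lines.dropLast.map (fun line =>
        PySem.List.slice
          (((PySem.List.slice? line.toList (some 1) (some ((first.toList.length:Int))) 4).getD [])
            ++ List.replicate ((m:Int)).toNat ' ')
          none (some ((m:Int))))
      = lines.dropLast.map (fun line =>
          (List.range m).map (fun k => charAt first.toList.length k line)) := by
    apply List.map_congr_left
    intro line hmem
    exact grid_row line first.toList.length K m hK (hvalid line hmem)
  rw [hgrid]
  -- transpose the rectangular grid
  obtain ⟨t, hrest⟩ : ∃ t, lines.dropLast = first :: t := by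
    cases hr : lines.dropLast with
    | nil => rw [hr] at hh; simp at hh
    | cons a t =>
      rw [hr] at hh
      simp only [List.head?_cons, Option.some.injEq] at hh
      exact ⟨t, by rw [hh]⟩
  rw [hrest]
  simp only [List.map_cons, pyZip]
  rw [pyZipAux_cols m _ _ (by simp) ?hlens]
  case hlens =>
    intro u hu
    rw [List.mem_map] at hu
    obtain ⟨line, _, rfl⟩ := hu
    simp
  rw [List.map_map]
  apply List.map_congr_left
  intro k hkm
  rw [List.mem_range] at hkm
  simp only [Function.comp_apply, List.nil_append]
  -- the k-th column of the grid, read back row-wise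
  have hcol : ((List.range m).map (fun j => charAt first.toList.length j first)
        :: t.map (fun line => (List.range m).map (fun j => charAt first.toList.length j line))).map
        (fun u => u.getD k ' ')
      = (first :: t).map (fun row => charAt first.toList.length k row) := by
    simp only [List.map_cons, List.map_map]
    congr 1
    · rw [List.getD_eq_getElem _ _ (by simpa using hkm), List.getElem_map, List.getElem_range]
    · apply List.map_congr_left
      intro line _
      simp only [Function.comp_apply]
      rw [List.getD_eq_getElem _ _ (by simpa using hkm), List.getElem_map, List.getElem_range]
  rw [hcol, ← hrest, ← List.map_reverse, column_filter]
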